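/- GENERATED by farm/mkstatement.py from design/units.tsv (unit `start_decoder.C3b`) and the assertions of Vorbis/Spec/StartDecoderC3.lean — do not edit.
   THE STATEMENT of the proof unit `start_decoder.C3b`: segment C3b of `start_decoder` (36 instructions; entries 0x114536;
   exits 0x113b22,0x114536,0x114590; ranges 0x114507-0x114533 + 0x114536-0x11458b)
   takes each of its entry assertions to one of its exit assertions (`Vorbis.Spec.StartDecoder.SegC3b`), given the contracts of its callees.
   What the names mean: Vorbis/Spec/Basic.lean (the shared hypotheses), Vorbis/Spec/StartDecoderC3.lean (the assertions). The theorem to prove: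
   `theorem start_decoder_C3b_ok : Vorbis.Spec.start_decoder_C3b.Statement`. -/
import Vorbis.Spec.Leaves
import Vorbis.Spec.Leaves2
import Vorbis.Spec.Libc
import Vorbis.Spec.Reader
import Vorbis.Spec.StartDecoderC3
namespace Vorbis.Spec.start_decoder_C3b
open X86 X86.User Asan

/-- The statement of unit `start_decoder.C3b`. -/
def Statement : Prop :=
  ∀ (Lay : Layout) (_hLay : Lay.hi = 0x1000000) (μ : Microarch) (_hμ : UserX.MicroOK μ) (u₀ : State)
    (_hcode : HasCodeNat Lay u₀ Vorbis.L.start_decoder.entry Vorbis.Code.code_start_decoder.nat Vorbis.L.start_decoder.size)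
    (_h_get_bits : ∀ (others : List Obj) (frames : List (Nat × FrameLayout)) (Blk : Block → Prop) (len : Nat), Calls Lay μ Vorbis.WayInv (Vorbis.conv u₀) Vorbis.L.get_bits.entry (Vorbis.Spec.get_bits.spec others frames Blk len))
    (_h_error : ∀ (others : List Obj) (frames : List (Nat × FrameLayout)), Calls Lay μ Vorbis.WayInv (Vorbis.conv u₀) Vorbis.L.error.entry (Vorbis.Spec.error.spec others frames))
    (_h_memset : ∀ (others : List Obj) (frames : List (Nat × FrameLayout)), Calls Lay μ Vorbis.WayInv (Vorbis.conv u₀) Vorbis.L.memset.entry (Vorbis.Spec.memset.spec others frames))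
    (_h_asan_load4_noabort : Asan.SmallCheck Lay μ Vorbis.WayInv (Vorbis.CodeOK u₀) [.rax, .rcx, .rdx] 4 Vorbis.L.__asan_load4_noabort.entry)
    (_h_ilog : ∀ (others : List Obj) (frames : List (Nat × FrameLayout)), Calls Lay μ Vorbis.WayInv (Vorbis.conv u₀) Vorbis.L.ilog.entry (Vorbis.Spec.ilog.spec others frames)),
    Vorbis.Spec.StartDecoder.SegC3b Lay μ u₀

end Vorbis.Spec.start_decoder_C3b
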